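-- pv_equiv track=rewrite | github.com/Raghav140/customer-segmentation-ml | streamlit_app.py | explain_like_manager
-- ===== SOURCE A (Python) =====
-- def explain_like_manager(insights, cluster_names):
--     """Generate simple, business-friendly explanations."""
--     explanations = {}
--
--     for cluster_id, cluster_name in cluster_names.items():
--         if cluster_id in insights:
--             insight = insights[cluster_id]
--
--             # Create simple explanation
--             if "Premium" in cluster_name:
--                 explanation = "💎 **High-Value Customers**: These customers spend a lot and have high income. Give them VIP treatment and exclusive offers to keep them loyal."
--             elif "Budget" in cluster_name:
--                 explanation = "💵 **Budget-Conscious**: These customers watch their spending carefully. Offer them value deals and discounts to increase their purchases."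
--             elif "Young" in cluster_name:
--                 explanation = "🚀 **Growing Professionals**: Young customers with good income potential. Build long-term relationships with digital-first experiences."
--             elif "At Risk" in cluster_name:
--                 explanation = "⚠️ **Leaving Customers**: They haven't purchased recently. Send them special offers immediately before they're gone forever."
--             elif "Frequent" in cluster_name:
--                 explanation = "🔥 **Regular Shoppers**: They buy often but could spend more. Recommend premium products to increase their value."
--             else:
--                 explanation = f"👥 **Standard Customers**: Typical customer behavior. Maintain good service with occasional promotions."
--
--             explanations[cluster_id] = explanation
--
--     return explanations
-- ===== SOURCE B (Python) =====
-- _TABLE = [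
--     ("Premium", "\U0001F48E **High-Value Customers**: These customers spend a lot and have high income. Give them VIP treatment and exclusive offers to keep them loyal."),
--     ("Budget", "\U0001F4B5 **Budget-Conscious**: These customers watch their spending carefully. Offer them value deals and discounts to increase their purchases."),
--     ("Young", "\U0001F680 **Growing Professionals**: Young customers with good income potential. Build long-term relationships with digital-first experiences."),
--     ("At Risk", "\u26A0\uFE0F **Leaving Customers**: They haven't purchased recently. Send them special offers immediately before they're gone forever."),
--     ("Frequent", "\U0001F525 **Regular Shoppers**: They buy often but could spend more. Recommend premium products to increase their value."),
-- ]
-- _DEFAULT = "\U0001F465 **Standard Customers**: Typical customer behavior. Maintain good service with occasional promotions."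
--
--
-- def explain_like_manager(insights, cluster_names):
--     """Generate explanations by painting: start everything as Standard, then
--     overwrite in reverse priority order so the highest-priority keyword wins."""
--     relevant = {cid: name for cid, name in cluster_names.items() if cid in insights}
--     result = {cid: _DEFAULT for cid in relevant}
--     for keyword, text in reversed(_TABLE):
--         for cid, name in relevant.items():
--             if keyword in name:
--                 result[cid] = text
--     return result
-- ===== Notes on version B (the rewrite author's own statement) =====
-- stated objective: alternative
-- what changed: Replaces A's per-name if/elif first-match chain with a painting algorithm: B first builds the filtered relevant dict, initialises every result to the Standard default, then sweeps the keyword table in reverse priority order, each pass overwriting the clusters whose name contains that keyword, so the highest-priority keyword wins by last write instead of first match.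
import Mathlib
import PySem

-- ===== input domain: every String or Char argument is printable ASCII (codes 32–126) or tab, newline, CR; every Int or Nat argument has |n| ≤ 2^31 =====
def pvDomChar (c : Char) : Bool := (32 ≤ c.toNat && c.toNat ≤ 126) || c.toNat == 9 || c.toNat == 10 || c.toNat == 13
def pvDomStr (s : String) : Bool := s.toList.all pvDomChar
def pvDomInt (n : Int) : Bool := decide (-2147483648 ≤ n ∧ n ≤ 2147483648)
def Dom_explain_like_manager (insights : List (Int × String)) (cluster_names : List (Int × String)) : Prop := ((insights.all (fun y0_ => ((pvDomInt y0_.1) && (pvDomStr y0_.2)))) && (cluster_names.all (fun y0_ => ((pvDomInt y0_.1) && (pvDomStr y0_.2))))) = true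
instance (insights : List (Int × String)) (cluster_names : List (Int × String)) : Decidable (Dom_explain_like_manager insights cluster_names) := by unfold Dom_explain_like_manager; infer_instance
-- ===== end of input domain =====

-- B replaces A's per-name if/elif chain by a painting algorithm: start every relevant cluster
-- at the Standard default, then sweep the keyword table in reverse priority order, overwriting
-- matches, so the highest-priority keyword wins (alternative decomposition, same cost).

-- ===== PORT A =====
-- the six literal explanation strings of A
def pvExplPremium : String := "💎 **High-Value Customers**: These customers spend a lot and have high income. Give them VIP treatment and exclusive offers to keep them loyal."
def pvExplBudget : String := "💵 **Budget-Conscious**: These customers watch their spending carefully. Offer them value deals and discounts to increase their purchases."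
def pvExplYoung : String := "🚀 **Growing Professionals**: Young customers with good income potential. Build long-term relationships with digital-first experiences."
def pvExplAtRisk : String := "⚠️ **Leaving Customers**: They haven't purchased recently. Send them special offers immediately before they're gone forever."
def pvExplFrequent : String := "🔥 **Regular Shoppers**: They buy often but could spend more. Recommend premium products to increase their value."
def pvExplDefault : String := "👥 **Standard Customers**: Typical customer behavior. Maintain good service with occasional promotions."

-- A: loop over cluster_names.items(); 'cluster_id in insights' is dict-key membership;
-- the if/elif chain picks the explanation; explanations[cluster_id] = explanation.
def explain_like_manager (insights : List (Int × String)) (cluster_names : List (Int × String)) : List (Int × String) :=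
  (cluster_names.foldl (fun (explanations : PySem.Dict Int String) p =>
      if insights.any (fun q => q.1 == p.1) then
        let explanation :=
          if PySem.Str.isIn "Premium" p.2 then pvExplPremium
          else if PySem.Str.isIn "Budget" p.2 then pvExplBudget
          else if PySem.Str.isIn "Young" p.2 then pvExplYoung
          else if PySem.Str.isIn "At Risk" p.2 then pvExplAtRisk
          else if PySem.Str.isIn "Frequent" p.2 then pvExplFrequent
          else pvExplDefault
        explanations.insert p.1 explanation
      else explanations)
    PySem.Dict.empty).items

-- ===== PORT B =====
-- B's ordered keyword table (priority order Premium, Budget, Young, At Risk, Frequent)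
def pvTable : List (String × String) :=
  [("Premium", pvExplPremium), ("Budget", pvExplBudget), ("Young", pvExplYoung),
   ("At Risk", pvExplAtRisk), ("Frequent", pvExplFrequent)]

-- B: relevant = filtered dict comprehension; result starts all-default; then paint in
-- reverse priority order, each keyword pass overwriting the clusters whose name matches.
def explain_like_manager_alt (insights : List (Int × String)) (cluster_names : List (Int × String)) : List (Int × String) :=
  let relevant : PySem.Dict Int String :=
    cluster_names.foldl (fun d p =>
      if insights.any (fun q => q.1 == p.1) then d.insert p.1 p.2 else d) PySem.Dict.empty
  let result : PySem.Dict Int String :=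
    relevant.items.foldl (fun d p => d.insert p.1 pvExplDefault) PySem.Dict.empty
  (pvTable.reverse.foldl (fun r kv =>
      relevant.items.foldl (fun r p =>
        if PySem.Str.isIn kv.1 p.2 then r.insert p.1 kv.2 else r) r)
    result).items

-- ===== PRECONDITION & SPEC =====
def Spec_explain_like_manager (insights : List (Int × String)) (cluster_names : List (Int × String)) (out : List (Int × String)) : Prop := out = explain_like_manager_alt insights cluster_names
instance (insights : List (Int × String)) (cluster_names : List (Int × String)) (out : List (Int × String)) : Decidable (Spec_explain_like_manager insights cluster_names out) := by unfold Spec_explain_like_manager; infer_instance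

-- ===== CLAIM =====
def Claim_equal_explain_like_manager : Prop := ∀ (insights : List (Int × String)) (cluster_names : List (Int × String)), Dom_explain_like_manager insights cluster_names → Spec_explain_like_manager insights cluster_names (explain_like_manager insights cluster_names)

-- ===== LEMMAS AND PROOFS =====

-- A's if/elif chain as a function of the name (proof-side abbreviation only)
def pvChain (name : String) : String :=
  if PySem.Str.isIn "Premium" name then pvExplPremium
  else if PySem.Str.isIn "Budget" name then pvExplBudget
  else if PySem.Str.isIn "Young" name then pvExplYoung
  else if PySem.Str.isIn "At Risk" name then pvExplAtRisk
  else if PySem.Str.isIn "Frequent" name then pvExplFrequent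
  else pvExplDefault

-- the filtered loop keeps keys Nodup
theorem pv_nodup_rel (insights : List (Int × String)) :
    ∀ (l : List (Int × String)) (d : PySem.Dict Int String), d.keys.Nodup →
      ((l.foldl (fun d p =>
          if insights.any (fun q => q.1 == p.1) then d.insert p.1 p.2 else d) d).keys).Nodup := by
  intro l
  induction l with
  | nil => intro d h; exact h
  | cons p l ih =>
    intro d h
    simp only [List.foldl_cons]
    split
    · exact ih _ (PySem.Dict.nodup_keys_insert d p.1 p.2 h)
    · exact ih _ h

-- an entry-wise update touches only the entry with key k when keys avoid k
theorem pv_map_update_id (k : Int) (text : String) (M : List (Int × String))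
    (h : k ∉ M.map Prod.fst) :
    M.map (fun q => if q.1 == k then (k, text) else q) = M := by
  apply List.map_congr_left ?_ |>.trans (List.map_id M)
  intro q hq
  have : q.1 ≠ k := by
    intro e; exact h (List.mem_map.mpr ⟨q, hq, e⟩)
  simp [this]

-- A's dict is the relevant dict with pvChain applied to each value
theorem pv_A_eq_mapped (insights : List (Int × String)) :
    ∀ (l : List (Int × String)) (d d' : PySem.Dict Int String),
      d'.items = d.items.map (fun p => (p.1, pvChain p.2)) →
      (l.foldl (fun (e : PySem.Dict Int String) p =>
          if insights.any (fun q => q.1 == p.1) then e.insert p.1 (pvChain p.2) else e) d').items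
      = ((l.foldl (fun (d : PySem.Dict Int String) p =>
          if insights.any (fun q => q.1 == p.1) then d.insert p.1 p.2 else d) d).items).map
          (fun p => (p.1, pvChain p.2)) := by
  intro l
  induction l with
  | nil => intro d d' h; simpa using h
  | cons p l ih =>
    intro d d' h
    simp only [List.foldl_cons]
    split
    · apply ih
      have hkeys : d'.keys = d.keys := by
        simp only [PySem.Dict.keys, h, List.map_map]; rfl
      have hc : d'.contains p.1 = d.contains p.1 := by
        simp [PySem.Dict.contains_eq_decide_mem_keys, hkeys]
      rw [PySem.Dict.items_insert, PySem.Dict.items_insert, hc]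
      split
      · rw [h, List.map_map, List.map_map]
        apply List.map_congr_left
        intro q _
        by_cases hq : q.1 = p.1 <;> simp [hq]
      · simp [h]
    · exact ih d d' h

-- the all-default initial dict
theorem pv_result0_items (L : List (Int × String)) (hnd : (L.map Prod.fst).Nodup) :
    (L.foldl (fun (d : PySem.Dict Int String) p => d.insert p.1 pvExplDefault)
        PySem.Dict.empty).items
      = L.map (fun p => (p.1, pvExplDefault)) := by
  have := PySem.Dict.items_foldl_insert_fresh (l := L) (k := Prod.fst)
      (v := fun _ => pvExplDefault) (d := PySem.Dict.empty)
      (by intro a _; simp) hnd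
  simpa using this

-- one painting pass: with painted prefix L1 and pending suffix L2, the pass
-- rewrites exactly the matching values of L2 (keys are distinct)
theorem pv_paint (kw text : String) (g : Int × String → String) :
    ∀ (L2 L1 : List (Int × String)), ((L1 ++ L2).map Prod.fst).Nodup →
      (L2.foldl (fun (r : PySem.Dict Int String) p =>
          if PySem.Str.isIn kw p.2 then r.insert p.1 text else r)
        (PySem.Dict.mk
          (L1.map (fun p => (p.1, if PySem.Str.isIn kw p.2 then text else g p))
            ++ L2.map (fun p => (p.1, g p))))).items
      = (L1 ++ L2).map (fun p => (p.1, if PySem.Str.isIn kw p.2 then text else g p)) := by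
  intro L2
  induction L2 with
  | nil => intro L1 _; simp
  | cons p L2 ih =>
    intro L1 hnd
    have hnd' : (p.1 :: (L1.map Prod.fst ++ L2.map Prod.fst)).Nodup := by
      rw [← List.nodup_middle]; simpa [List.map_append] using hnd
    have hp := List.nodup_cons.mp hnd'
    have hp1 : p.1 ∉ L1.map Prod.fst := fun h => hp.1 (List.mem_append.mpr (Or.inl h))
    have hp2 : p.1 ∉ L2.map Prod.fst := fun h => hp.1 (List.mem_append.mpr (Or.inr h))
    have hnd2 : (((L1 ++ [p]) ++ L2).map Prod.fst).Nodup := by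
      simpa [List.append_assoc] using hnd
    simp only [List.map_cons, List.foldl_cons]
    by_cases hm : PySem.Str.isIn kw p.2
    · have hm' : PySem.Chars.isIn kw.toList p.2.toList = true := by
        simpa [PySem.Str.isIn] using hm
      -- the pass overwrites this entry
      have hcontains : (PySem.Dict.mk
          (L1.map (fun p => (p.1, if PySem.Str.isIn kw p.2 then text else g p))
            ++ (p.1, g p) :: L2.map (fun p => (p.1, g p)))).contains p.1 = true := by
        rw [PySem.Dict.contains_eq_decide_mem_keys]
        simp [PySem.Dict.keys]
      have hins : ((PySem.Dict.mk
          (L1.map (fun p => (p.1, if PySem.Str.isIn kw p.2 then text else g p))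
            ++ (p.1, g p) :: L2.map (fun p => (p.1, g p)))).insert p.1 text)
          = PySem.Dict.mk
            ((L1 ++ [p]).map (fun p => (p.1, if PySem.Str.isIn kw p.2 then text else g p))
              ++ L2.map (fun p => (p.1, g p))) := by
        apply PySem.Dict.ext
        rw [PySem.Dict.items_insert_of_contains _ text hcontains]
        show (L1.map (fun p => (p.1, if PySem.Str.isIn kw p.2 then text else g p))
            ++ (p.1, g p) :: L2.map (fun p => (p.1, g p))).map
              (fun q => if q.1 == p.1 then (p.1, text) else q) = _
        rw [List.map_append, List.map_cons]
        rw [pv_map_update_id p.1 text _ (by simpa [List.map_map] using hp1)]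
        rw [pv_map_update_id p.1 text _ (by simpa [List.map_map] using hp2)]
        simp [hm']
      rw [if_pos hm, hins, ih (L1 ++ [p]) hnd2]
      simp [List.append_assoc]
    · -- this entry keeps its current value
      have hm' : PySem.Chars.isIn kw.toList p.2.toList = false := by
        simpa [PySem.Str.isIn] using hm
      rw [if_neg hm]
      have heq : L1.map (fun p => (p.1, if PySem.Str.isIn kw p.2 then text else g p))
            ++ (p.1, g p) :: L2.map (fun p => (p.1, g p))
          = (L1 ++ [p]).map (fun p => (p.1, if PySem.Str.isIn kw p.2 then text else g p))
            ++ L2.map (fun p => (p.1, g p)) := by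
        simp [hm']
      rw [heq, ih (L1 ++ [p]) hnd2]
      simp [List.append_assoc]

-- B's result is the relevant dict with pvChain applied to each value
theorem pv_B_items (insights : List (Int × String)) (cluster_names : List (Int × String)) :
    explain_like_manager_alt insights cluster_names
      = ((cluster_names.foldl (fun (d : PySem.Dict Int String) p =>
            if insights.any (fun q => q.1 == p.1) then d.insert p.1 p.2 else d)
          PySem.Dict.empty).items).map (fun p => (p.1, pvChain p.2)) := by
  have hnd : (((cluster_names.foldl (fun (d : PySem.Dict Int String) p =>
        if insights.any (fun q => q.1 == p.1) then d.insert p.1 p.2 else d)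
      PySem.Dict.empty).items).map Prod.fst).Nodup :=
    pv_nodup_rel insights cluster_names PySem.Dict.empty (by simp)
  show (pvTable.reverse.foldl (fun r kv =>
      ((cluster_names.foldl (fun (d : PySem.Dict Int String) p =>
            if insights.any (fun q => q.1 == p.1) then d.insert p.1 p.2 else d)
          PySem.Dict.empty).items).foldl (fun r p =>
        if PySem.Str.isIn kv.1 p.2 then r.insert p.1 kv.2 else r) r)
    (((cluster_names.foldl (fun (d : PySem.Dict Int String) p =>
            if insights.any (fun q => q.1 == p.1) then d.insert p.1 p.2 else d)
          PySem.Dict.empty).items).foldl (fun (d : PySem.Dict Int String) p =>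
        d.insert p.1 pvExplDefault) PySem.Dict.empty)).items = _
  generalize hL : (cluster_names.foldl (fun (d : PySem.Dict Int String) p =>
      if insights.any (fun q => q.1 == p.1) then d.insert p.1 p.2 else d)
    PySem.Dict.empty).items = L at hnd ⊢
  have hpaint : ∀ (kw text : String) (g : Int × String → String) (r : PySem.Dict Int String),
      r.items = L.map (fun p => (p.1, g p)) →
      (L.foldl (fun (r : PySem.Dict Int String) p =>
          if PySem.Str.isIn kw p.2 then r.insert p.1 text else r) r).items
        = L.map (fun p => (p.1, if PySem.Str.isIn kw p.2 then text else g p)) := by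
    intro kw text g r hr
    have hmk : r = PySem.Dict.mk
        (([] : List (Int × String)).map (fun p => (p.1, if PySem.Str.isIn kw p.2 then text else g p))
          ++ L.map (fun p => (p.1, g p))) := by
      apply PySem.Dict.ext; simpa using hr
    rw [hmk, pv_paint kw text g L [] (by simpa using hnd)]
    simp
  have hrev : pvTable.reverse =
      [("Frequent", pvExplFrequent), ("At Risk", pvExplAtRisk), ("Young", pvExplYoung),
       ("Budget", pvExplBudget), ("Premium", pvExplPremium)] := rfl
  rw [hrev]
  simp only [List.foldl_cons, List.foldl_nil]
  have h0 := pv_result0_items L hnd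
  have h1 := hpaint "Frequent" pvExplFrequent (fun _ => pvExplDefault) _ h0
  have h2 := hpaint "At Risk" pvExplAtRisk
    (fun p => if PySem.Str.isIn "Frequent" p.2 then pvExplFrequent else pvExplDefault) _ h1
  have h3 := hpaint "Young" pvExplYoung
    (fun p => if PySem.Str.isIn "At Risk" p.2 then pvExplAtRisk
      else if PySem.Str.isIn "Frequent" p.2 then pvExplFrequent else pvExplDefault) _ h2
  have h4 := hpaint "Budget" pvExplBudget
    (fun p => if PySem.Str.isIn "Young" p.2 then pvExplYoung
      else if PySem.Str.isIn "At Risk" p.2 then pvExplAtRisk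
      else if PySem.Str.isIn "Frequent" p.2 then pvExplFrequent else pvExplDefault) _ h3
  have h5 := hpaint "Premium" pvExplPremium
    (fun p => if PySem.Str.isIn "Budget" p.2 then pvExplBudget
      else if PySem.Str.isIn "Young" p.2 then pvExplYoung
      else if PySem.Str.isIn "At Risk" p.2 then pvExplAtRisk
      else if PySem.Str.isIn "Frequent" p.2 then pvExplFrequent else pvExplDefault) _ h4
  exact h5.trans (by rfl)

-- ===== VERDICT =====
theorem explain_like_manager_spec : Claim_equal_explain_like_manager := by
  intro insights cluster_names _
  unfold Spec_explain_like_manager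
  rw [pv_B_items insights cluster_names]
  exact pv_A_eq_mapped insights cluster_names PySem.Dict.empty PySem.Dict.empty rfl
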